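-- pv_equiv track=rewrite | github.com/endorphinmachine/RTK-TS | distance_calculate.py | dist_vote
-- ===== SOURCE A (Python) =====
-- def dist_vote(pairs, level=2):
--     # pairs 所有站点所有观测组合
--
--     score, group, result = {}, {}, {}
--     for k, v in pairs.items():
--         points = k.split(',')
--         for p in points:
--             dist = abs(v[0] - v[1])
--             if p in score.keys():
--                 score[p] += dist
--             else:
--                 score[p] = dist
--
--         for k, v in score.items():
--             s = k.split('-')[0]
--             s = s[:4]
--             if s in group.keys():
--                 group[s].update({k: v})
--             else:
--                 group[s] = {k: v}
--
--     for k, v in group.items():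
--         rank = sorted(v.items(), key=lambda x: x[1])
--         rank = [i[0] for i in rank]
--         result[k] = rank[:level]
--     return result
-- ===== SOURCE B (Python) =====
-- def dist_vote(pairs, level=2):
--     # One pass accumulates per-point scores; group/ranking is built once at the end
--     # (A rebuilds the whole grouping after every pair, which is quadratic).
--     score = {}
--     for k, v in pairs.items():
--         dist = abs(v[0] - v[1])
--         for p in k.split(','):
--             score[p] = score.get(p, 0) + dist
--     group = {}
--     for k, v in score.items():
--         group.setdefault(k.split('-')[0][:4], []).append((k, v))
--     return {s: [k for k, _ in sorted(items, key=lambda x: x[1])][:level]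
--             for s, items in group.items()}
-- ===== Notes on version B (the rewrite author's own statement) =====
-- stated objective: faster
-- what changed: A rebuilds the whole prefix grouping from the growing score dict after every input pair (quadratic); B accumulates the per-point scores in one pass and builds the grouping and the per-group ranking once at the end.
import Mathlib
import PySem

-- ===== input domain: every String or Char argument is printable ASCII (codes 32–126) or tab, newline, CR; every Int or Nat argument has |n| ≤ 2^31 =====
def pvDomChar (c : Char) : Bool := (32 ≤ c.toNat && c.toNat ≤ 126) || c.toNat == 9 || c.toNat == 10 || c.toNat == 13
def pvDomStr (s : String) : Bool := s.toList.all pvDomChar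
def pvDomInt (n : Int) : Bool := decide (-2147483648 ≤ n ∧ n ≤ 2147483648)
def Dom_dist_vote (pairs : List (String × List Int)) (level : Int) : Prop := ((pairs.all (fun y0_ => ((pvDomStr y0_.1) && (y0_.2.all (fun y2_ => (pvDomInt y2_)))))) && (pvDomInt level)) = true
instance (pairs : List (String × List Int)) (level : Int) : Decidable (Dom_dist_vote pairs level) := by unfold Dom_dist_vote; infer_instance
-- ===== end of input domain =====

-- B accumulates the per-point scores in one pass and groups/ranks once at the end,
-- instead of A's rebuilding of the grouping from the score dict after every pair.

-- shared helper: the group key `k.split('-')[0][:4]` (identical fragment in both Pythons);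
-- `split('-')` never returns an empty list, so the `[0]` never raises and `headD ""` is exact.
def pvPrefix (k : String) : String :=
  PySem.Str.slice (((PySem.Str.split? k "-").getD []).headD "") none (some 4)

-- ===== PORT A =====
-- `v[0]`/`v[1]` raise IndexError on lists shorter than 2; Pre_ excludes that, `getD 0` is unreached there.
def dist_vote (pairs : List (String × List Int)) (level : Int) : List (String × List String) :=
  let sg := pairs.foldl (fun (sg : PySem.Dict String Int × PySem.Dict String (PySem.Dict String Int)) kv =>
      let score := ((PySem.Str.split? kv.1 ",").getD []).foldl (fun score p =>
          let dist : Int := |(PySem.List.pyGet? kv.2 0).getD 0 - (PySem.List.pyGet? kv.2 1).getD 0|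
          if score.contains p then score.insert p (score.getD p 0 + dist)
          else score.insert p dist) sg.1
      let group := score.items.foldl (fun group kv2 =>
          let s := pvPrefix kv2.1
          if group.contains s then group.insert s ((group.getD s PySem.Dict.empty).insert kv2.1 kv2.2)
          else group.insert s (PySem.Dict.empty.insert kv2.1 kv2.2)) sg.2
      (score, group)) (PySem.Dict.empty, PySem.Dict.empty)
  (sg.2.items.foldl (fun result kv =>
      result.insert kv.1
        (PySem.List.slice ((PySem.List.sorted kv.2.items (fun x => x.2) false).map (fun i => i.1)) none (some level)))
    PySem.Dict.empty).items

-- ===== PORT B =====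
def dist_vote_alt (pairs : List (String × List Int)) (level : Int) : List (String × List String) :=
  let score := pairs.foldl (fun score kv =>
      let dist : Int := |(PySem.List.pyGet? kv.2 0).getD 0 - (PySem.List.pyGet? kv.2 1).getD 0|
      ((PySem.Str.split? kv.1 ",").getD []).foldl (fun score p => score.insert p (score.getD p 0 + dist)) score)
    PySem.Dict.empty
  let group := score.items.foldl (fun group kv =>
      group.modify (pvPrefix kv.1) [] (fun l => l ++ [kv])) PySem.Dict.empty
  group.items.map (fun si =>
    (si.1, PySem.List.slice ((PySem.List.sorted si.2 (fun x => x.2) false).map (fun i => i.1)) none (some level)))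

-- ===== PRECONDITION & SPEC =====
-- Pre_ excludes exactly the inputs on which A raises IndexError: a value list with fewer than two entries.
def Pre_dist_vote (pairs : List (String × List Int)) (level : Int) : Prop :=
  ∀ p ∈ pairs, 2 ≤ p.2.length
instance (pairs : List (String × List Int)) (level : Int) : Decidable (Pre_dist_vote pairs level) := by
  unfold Pre_dist_vote; infer_instance
def pvWitness_dist_vote : (List (String × List Int)) × Int := ([("ab-1,cd-2", [3, 1])], 2)

def Spec_dist_vote (pairs : List (String × List Int)) (level : Int) (out : List (String × List String)) : Prop := out = dist_vote_alt pairs level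
instance (pairs : List (String × List Int)) (level : Int) (out : List (String × List String)) : Decidable (Spec_dist_vote pairs level out) := by unfold Spec_dist_vote; infer_instance

-- ===== CLAIM (what is proved, stated in full; the proofs are below) =====
def Claim_equal_dist_vote : Prop := ∀ (pairs : List (String × List Int)) (level : Int), Dom_dist_vote pairs level → Pre_dist_vote pairs level → Spec_dist_vote pairs level (dist_vote pairs level)

-- ===== LEMMAS AND PROOFS =====

-- proof-side helpers: canonical names for the folds the two ports perform

def pvDist (v : List Int) : Int := |(PySem.List.pyGet? v 0).getD 0 - (PySem.List.pyGet? v 1).getD 0|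

def pvSplit (k : String) : List String := (PySem.Str.split? k ",").getD []

def pvRank (d : List (String × Int)) (level : Int) : List String :=
  PySem.List.slice ((PySem.List.sorted d (fun x => x.2) false).map (fun i => i.1)) none (some level)

-- A's per-pair score update (branching form) and B's (uniform form)
def pvStepScA (sc : PySem.Dict String Int) (kv : String × List Int) : PySem.Dict String Int :=
  (pvSplit kv.1).foldl (fun score p =>
    if score.contains p then score.insert p (score.getD p 0 + pvDist kv.2)
    else score.insert p (pvDist kv.2)) sc

def pvStepSc (sc : PySem.Dict String Int) (kv : String × List Int) : PySem.Dict String Int :=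
  (pvSplit kv.1).foldl (fun score p => score.insert p (score.getD p 0 + pvDist kv.2)) sc

-- A's grouping pass over a score-items list (branching form) and its uniform insert form
def pvRunGA (g : PySem.Dict String (PySem.Dict String Int)) (l : List (String × Int)) :
    PySem.Dict String (PySem.Dict String Int) :=
  l.foldl (fun group kv2 =>
    let s := pvPrefix kv2.1
    if group.contains s then group.insert s ((group.getD s PySem.Dict.empty).insert kv2.1 kv2.2)
    else group.insert s (PySem.Dict.empty.insert kv2.1 kv2.2)) g

def pvRunG (g : PySem.Dict String (PySem.Dict String Int)) (l : List (String × Int)) :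
    PySem.Dict String (PySem.Dict String Int) :=
  l.foldl (fun group kv =>
    group.insert (pvPrefix kv.1) ((group.getD (pvPrefix kv.1) PySem.Dict.empty).insert kv.1 kv.2)) g

-- plain insert fold (the inner-dict updates a grouping pass performs at one group key)
def pvInsKV (d : PySem.Dict String Int) (m : List (String × Int)) : PySem.Dict String Int :=
  m.foldl (fun d kv => d.insert kv.1 kv.2) d

-- B's grouping fold
def pvGB (l : List (String × Int)) : PySem.Dict String (List (String × Int)) :=
  l.foldl (fun group kv => group.modify (pvPrefix kv.1) [] (fun ls => ls ++ [kv])) PySem.Dict.empty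

def pvScore (pairs : List (String × List Int)) : PySem.Dict String Int :=
  pairs.foldl pvStepSc PySem.Dict.empty

-- the two ports, re-expressed through the helpers (definitional)
lemma pvA_eq (pairs : List (String × List Int)) (level : Int) :
    dist_vote pairs level =
      ((pairs.foldl (fun sg kv => (pvStepScA sg.1 kv, pvRunGA sg.2 (pvStepScA sg.1 kv).items))
          (PySem.Dict.empty, PySem.Dict.empty)).2.items.foldl
        (fun result kv => result.insert kv.1 (pvRank kv.2.items level)) PySem.Dict.empty).items := rfl

lemma pvB_eq (pairs : List (String × List Int)) (level : Int) :
    dist_vote_alt pairs level =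
      (pvGB (pvScore pairs).items).items.map (fun si => (si.1, pvRank si.2 level)) := rfl

-- branching forms equal the uniform forms
lemma pvStepScA_eq : pvStepScA = pvStepSc := by
  funext sc kv
  unfold pvStepScA pvStepSc
  have h : (fun (score : PySem.Dict String Int) p =>
      if score.contains p then score.insert p (score.getD p 0 + pvDist kv.2)
      else score.insert p (pvDist kv.2)) =
      (fun (score : PySem.Dict String Int) p => score.insert p (score.getD p 0 + pvDist kv.2)) := by
    funext score p
    by_cases h : score.contains p = true
    · simp [h]
    · have hf : score.contains p = false := by revert h; cases score.contains p <;> simp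
      rw [PySem.Dict.getD_of_not_contains score 0 hf, zero_add]
      simp [hf]
  rw [h]

lemma pvRunGA_eq : pvRunGA = pvRunG := by
  funext g l
  unfold pvRunGA pvRunG
  have h : (fun (group : PySem.Dict String (PySem.Dict String Int)) (kv2 : String × Int) =>
      let s := pvPrefix kv2.1
      if group.contains s then group.insert s ((group.getD s PySem.Dict.empty).insert kv2.1 kv2.2)
      else group.insert s (PySem.Dict.empty.insert kv2.1 kv2.2)) =
      (fun (group : PySem.Dict String (PySem.Dict String Int)) (kv : String × Int) =>
        group.insert (pvPrefix kv.1) ((group.getD (pvPrefix kv.1) PySem.Dict.empty).insert kv.1 kv.2)) := by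
    funext group kv
    by_cases h : group.contains (pvPrefix kv.1) = true
    · simp [h]
    · have hf : group.contains (pvPrefix kv.1) = false := by
        revert h; cases group.contains (pvPrefix kv.1) <;> simp
      rw [PySem.Dict.getD_of_not_contains group PySem.Dict.empty hf]
      simp [hf]
  rw [h]

-- keys of the folds
lemma keys_pvInsKV (d : PySem.Dict String Int) (m : List (String × Int)) :
    (pvInsKV d m).keys = PySem.Set.update d.keys (m.map (fun kv => kv.1)) := by
  unfold pvInsKV
  exact PySem.Dict.keys_foldl_insert_key m (fun kv => kv.1) (fun d kv => kv.2) d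

lemma nodup_keys_pvInsKV (d : PySem.Dict String Int) (m : List (String × Int))
    (h : d.keys.Nodup) : (pvInsKV d m).keys.Nodup := by
  unfold pvInsKV
  exact PySem.Dict.nodup_keys_foldl_insert_key m (fun kv => kv.1) (fun d kv => kv.2) d h

lemma keys_pvRunG (g : PySem.Dict String (PySem.Dict String Int)) (l : List (String × Int)) :
    (pvRunG g l).keys = PySem.Set.update g.keys (l.map (fun kv => pvPrefix kv.1)) := by
  unfold pvRunG
  exact PySem.Dict.keys_foldl_insert_key l (fun kv => pvPrefix kv.1)
    (fun g kv => (g.getD (pvPrefix kv.1) PySem.Dict.empty).insert kv.1 kv.2) g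

lemma nodup_keys_pvRunG (g : PySem.Dict String (PySem.Dict String Int)) (l : List (String × Int))
    (h : g.keys.Nodup) : (pvRunG g l).keys.Nodup := by
  unfold pvRunG
  exact PySem.Dict.nodup_keys_foldl_insert_key l (fun kv => pvPrefix kv.1)
    (fun g kv => (g.getD (pvPrefix kv.1) PySem.Dict.empty).insert kv.1 kv.2) g h

-- value of a grouping fold at one group key
lemma getD_pvRunG (l : List (String × Int)) (g : PySem.Dict String (PySem.Dict String Int)) (s : String) :
    (pvRunG g l).getD s PySem.Dict.empty =
      pvInsKV (g.getD s PySem.Dict.empty) (l.filter (fun kv => pvPrefix kv.1 == s)) := by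
  induction l generalizing g with
  | nil => simp [pvRunG, pvInsKV]
  | cons kv t ih =>
    have hstep : pvRunG g (kv :: t) =
        pvRunG (g.insert (pvPrefix kv.1) ((g.getD (pvPrefix kv.1) PySem.Dict.empty).insert kv.1 kv.2)) t := rfl
    rw [hstep, ih]
    by_cases hp : pvPrefix kv.1 == s
    · have hs : pvPrefix kv.1 = s := by simpa using hp
      subst hs
      simp only [List.filter_cons, hp, if_pos]
      rw [PySem.Dict.getD_insert_self g (pvPrefix kv.1)
        ((g.getD (pvPrefix kv.1) PySem.Dict.empty).insert kv.1 kv.2) PySem.Dict.empty]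
      rfl
    · have hne : s ≠ pvPrefix kv.1 := by
        intro hh; rw [hh] at hp; simp at hp
      simp only [List.filter_cons, hp]
      rw [if_neg (by simp), PySem.Dict.getD_insert_of_ne g
        ((g.getD (pvPrefix kv.1) PySem.Dict.empty).insert kv.1 kv.2) PySem.Dict.empty hne]

-- insert-fold lookups
lemma getD_pvInsKV_of_not_mem (m : List (String × Int)) (d : PySem.Dict String Int) (k : String)
    (h : k ∉ m.map (fun kv => kv.1)) : (pvInsKV d m).getD k 0 = d.getD k 0 := by
  induction m generalizing d with
  | nil => rfl
  | cons kv t ih =>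
    have hk : k ≠ kv.1 := by
      intro hh; exact h (by simp [hh])
    have ht : k ∉ t.map (fun kv => kv.1) := by
      intro hh; exact h (by simp [hh])
    have hstep : pvInsKV d (kv :: t) = pvInsKV (d.insert kv.1 kv.2) t := rfl
    rw [hstep, ih _ ht, PySem.Dict.getD_insert_of_ne d kv.2 0 hk]

lemma getD_pvInsKV_congr (m : List (String × Int)) (d d' : PySem.Dict String Int) (k : String)
    (h : k ∈ m.map (fun kv => kv.1) ∨ d.getD k 0 = d'.getD k 0) :
    (pvInsKV d m).getD k 0 = (pvInsKV d' m).getD k 0 := by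
  induction m generalizing d d' with
  | nil =>
    rcases h with h | h
    · simp at h
    · exact h
  | cons kv t ih =>
    have hstep : ∀ e : PySem.Dict String Int, pvInsKV e (kv :: t) = pvInsKV (e.insert kv.1 kv.2) t :=
      fun e => rfl
    rw [hstep, hstep]
    apply ih
    by_cases hk : k = kv.1
    · right
      rw [hk, PySem.Dict.getD_insert_self d kv.1 kv.2 0, PySem.Dict.getD_insert_self d' kv.1 kv.2 0]
    · rcases h with h | h
      · rcases (by simpa using h : k = kv.1 ∨ k ∈ t.map (fun kv => kv.1)) with h' | h'
        · exact absurd h' hk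
        · left; exact h'
      · right
        rw [PySem.Dict.getD_insert_of_ne d kv.2 0 hk, PySem.Dict.getD_insert_of_ne d' kv.2 0 hk, h]

lemma items_pvInsKV_empty (m : List (String × Int)) (h : (m.map (fun kv => kv.1)).Nodup) :
    (pvInsKV PySem.Dict.empty m).items = m := by
  unfold pvInsKV
  have := PySem.Dict.items_foldl_insert_fresh m (fun kv => kv.1) (fun kv => kv.2)
    PySem.Dict.empty (fun a _ => PySem.Dict.contains_empty _) h
  simpa using this

-- set-update absorption: re-running an update whose key list extends an earlier one wins
lemma pvSet_update_of_subset (S : PySem.Set String) (p : List String) (h : ∀ x ∈ p, x ∈ S) :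
    PySem.Set.update S p = S := by
  rw [PySem.Set.update_eq_append_filter]
  have hnil : (PySem.Set.ofList p).filter (fun y => !(PySem.Set.contains S y)) = [] := by
    rw [List.filter_eq_nil_iff]
    intro y hy
    have hyS : y ∈ S := h y ((PySem.Set.mem_ofList p y).mp hy)
    simpa using hyS
  rw [hnil, List.append_nil]

lemma pvSet_update_absorb (K : PySem.Set String) (p q : List String) (h : p <+: q) :
    PySem.Set.update (PySem.Set.update K p) q = PySem.Set.update K q := by
  obtain ⟨r, rfl⟩ := h
  rw [PySem.Set.update_append, PySem.Set.update_append,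
    pvSet_update_of_subset (PySem.Set.update K p) p
      (fun x hx => (PySem.Set.mem_update K p x).mpr (Or.inr hx))]

-- dict equality from equal nodup key lists and equal lookups
lemma pvDict_eq_of_keys_getD {v : Type} [BEq v] (dflt : v) (d d' : PySem.Dict String v)
    (hnd : d.keys.Nodup) (hnd' : d'.keys.Nodup) (hk : d.keys = d'.keys)
    (hg : ∀ k, d.getD k dflt = d'.getD k dflt) : d = d' := by
  apply PySem.Dict.ext
  rw [PySem.Dict.items_eq_map_keys d hnd dflt, PySem.Dict.items_eq_map_keys d' hnd' dflt, hk]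
  exact List.map_congr_left (fun k _ => by rw [hg k])

-- map-fst of a key filter
lemma pvFilter_map_fst (l : List (String × Int)) (q : String → Bool) :
    (l.filter (fun kv => q kv.1)).map (fun kv => kv.1) = (l.map (fun kv => kv.1)).filter q := by
  induction l with
  | nil => rfl
  | cons kv t ih => by_cases h : q kv.1 <;> simp [h, ih]

-- inner absorption
lemma pvInsKV_absorb (m1 m2 : List (String × Int))
    (hpre : (m1.map (fun kv => kv.1)) <+: (m2.map (fun kv => kv.1))) :
    pvInsKV (pvInsKV PySem.Dict.empty m1) m2 = pvInsKV PySem.Dict.empty m2 := by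
  have hsub : ∀ x ∈ m1.map (fun kv => kv.1), x ∈ m2.map (fun kv => kv.1) := fun x hx => hpre.subset hx
  apply pvDict_eq_of_keys_getD (0 : Int)
  · exact nodup_keys_pvInsKV _ _ (nodup_keys_pvInsKV _ _ (by simp [PySem.Dict.keys_empty]))
  · exact nodup_keys_pvInsKV _ _ (by simp [PySem.Dict.keys_empty])
  · rw [keys_pvInsKV, keys_pvInsKV, keys_pvInsKV]
    exact pvSet_update_absorb _ _ _ hpre
  · intro k
    apply getD_pvInsKV_congr
    by_cases hk : k ∈ m2.map (fun kv => kv.1)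
    · left; exact hk
    · right
      have hk1 : k ∉ m1.map (fun kv => kv.1) := fun hh => hk (hsub k hh)
      exact getD_pvInsKV_of_not_mem m1 PySem.Dict.empty k hk1

-- outer absorption: regrouping an extended score list subsumes the earlier grouping
lemma pvRunG_absorb (l1 l2 : List (String × Int))
    (hpre : (l1.map (fun kv => kv.1)) <+: (l2.map (fun kv => kv.1))) :
    pvRunG (pvRunG PySem.Dict.empty l1) l2 = pvRunG PySem.Dict.empty l2 := by
  apply pvDict_eq_of_keys_getD (PySem.Dict.empty : PySem.Dict String Int)
  · exact nodup_keys_pvRunG _ _ (nodup_keys_pvRunG _ _ (by simp [PySem.Dict.keys_empty]))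
  · exact nodup_keys_pvRunG _ _ (by simp [PySem.Dict.keys_empty])
  · rw [keys_pvRunG, keys_pvRunG, keys_pvRunG]
    apply pvSet_update_absorb
    have h1 : l1.map (fun kv => pvPrefix kv.1) = (l1.map (fun kv => kv.1)).map pvPrefix := by
      simp [List.map_map, Function.comp_def]
    have h2 : l2.map (fun kv => pvPrefix kv.1) = (l2.map (fun kv => kv.1)).map pvPrefix := by
      simp [List.map_map, Function.comp_def]
    rw [h1, h2]
    exact hpre.map pvPrefix
  · intro s
    rw [getD_pvRunG, getD_pvRunG, getD_pvRunG]
    apply pvInsKV_absorb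
    rw [pvFilter_map_fst l1 (fun x => pvPrefix x == s), pvFilter_map_fst l2 (fun x => pvPrefix x == s)]
    obtain ⟨r, hr⟩ := hpre
    rw [← hr, List.filter_append]
    exact ⟨_, rfl⟩

-- score keys only grow (as a prefix)
lemma pvKeys_prefix_stepSc (sc : PySem.Dict String Int) (kv : String × List Int) :
    sc.keys <+: (pvStepSc sc kv).keys := by
  unfold pvStepSc
  generalize pvSplit kv.1 = m
  induction m generalizing sc with
  | nil => exact List.prefix_rfl
  | cons p t ih =>
    refine List.IsPrefix.trans ?_ (ih (sc.insert p (sc.getD p 0 + pvDist kv.2)))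
    by_cases h : sc.contains p = true
    · rw [PySem.Dict.keys_insert_of_contains sc _ h]
    · have hf : sc.contains p = false := by revert h; cases sc.contains p <;> simp
      rw [PySem.Dict.keys_insert_of_not_contains sc _ hf]
      exact ⟨[p], rfl⟩

lemma pvNodup_keys_stepSc (sc : PySem.Dict String Int) (kv : String × List Int)
    (h : sc.keys.Nodup) : (pvStepSc sc kv).keys.Nodup := by
  unfold pvStepSc
  exact PySem.Dict.nodup_keys_foldl_insert (pvSplit kv.1) (fun d p => d.getD p 0 + pvDist kv.2) sc h

lemma pvNodup_keys_score (pairs : List (String × List Int)) : (pvScore pairs).keys.Nodup := by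
  unfold pvScore
  have : ∀ (l : List (String × List Int)) (sc : PySem.Dict String Int), sc.keys.Nodup →
      (l.foldl pvStepSc sc).keys.Nodup := by
    intro l
    induction l with
    | nil => exact fun sc h => h
    | cons kv t ih => exact fun sc h => ih _ (pvNodup_keys_stepSc sc kv h)
  exact this pairs PySem.Dict.empty (by simp [PySem.Dict.keys_empty])

-- the main loop invariant: A's interleaved grouping equals grouping the final score once
lemma pvMain (l : List (String × List Int)) (sc : PySem.Dict String Int) :
    l.foldl (fun sg kv => (pvStepSc sg.1 kv, pvRunG sg.2 (pvStepSc sg.1 kv).items))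
        (sc, pvRunG PySem.Dict.empty sc.items) =
      (l.foldl pvStepSc sc, pvRunG PySem.Dict.empty (l.foldl pvStepSc sc).items) := by
  induction l generalizing sc with
  | nil => rfl
  | cons kv t ih =>
    have hpre : (sc.items.map (fun kv => kv.1)) <+: ((pvStepSc sc kv).items.map (fun kv => kv.1)) := by
      have h1 : sc.items.map (fun kv => kv.1) = sc.keys := rfl
      have h2 : (pvStepSc sc kv).items.map (fun kv => kv.1) = (pvStepSc sc kv).keys := rfl
      rw [h1, h2]
      exact pvKeys_prefix_stepSc sc kv
    have habs : pvRunG (pvRunG PySem.Dict.empty sc.items) (pvStepSc sc kv).items =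
        pvRunG PySem.Dict.empty (pvStepSc sc kv).items := pvRunG_absorb _ _ hpre
    calc ((kv :: t).foldl (fun sg kv => (pvStepSc sg.1 kv, pvRunG sg.2 (pvStepSc sg.1 kv).items))
            (sc, pvRunG PySem.Dict.empty sc.items))
        = t.foldl (fun sg kv => (pvStepSc sg.1 kv, pvRunG sg.2 (pvStepSc sg.1 kv).items))
            (pvStepSc sc kv, pvRunG (pvRunG PySem.Dict.empty sc.items) (pvStepSc sc kv).items) := rfl
      _ = t.foldl (fun sg kv => (pvStepSc sg.1 kv, pvRunG sg.2 (pvStepSc sg.1 kv).items))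
            (pvStepSc sc kv, pvRunG PySem.Dict.empty (pvStepSc sc kv).items) := by rw [habs]
      _ = ((kv :: t).foldl pvStepSc sc, pvRunG PySem.Dict.empty ((kv :: t).foldl pvStepSc sc).items) :=
            ih (pvStepSc sc kv)

-- value of B's grouping fold at one group key
lemma getD_pvGBfold (l : List (String × Int)) (d : PySem.Dict String (List (String × Int))) (s : String) :
    (l.foldl (fun group kv => group.modify (pvPrefix kv.1) [] (fun ls => ls ++ [kv])) d).getD s [] =
      d.getD s [] ++ l.filter (fun kv => pvPrefix kv.1 == s) := by
  induction l generalizing d with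
  | nil => simp
  | cons kv t ih =>
    have hstep : (kv :: t).foldl (fun group kv => group.modify (pvPrefix kv.1) [] (fun ls => ls ++ [kv])) d =
        t.foldl (fun group kv => group.modify (pvPrefix kv.1) [] (fun ls => ls ++ [kv]))
          (d.modify (pvPrefix kv.1) [] (fun ls => ls ++ [kv])) := rfl
    rw [hstep, ih, PySem.Dict.getD_modify d (pvPrefix kv.1) s [] (fun ls => ls ++ [kv])]
    by_cases hp : pvPrefix kv.1 == s
    · have hs : s = pvPrefix kv.1 := ((by simpa using hp : pvPrefix kv.1 = s)).symm
      rw [if_pos hs, ← hs, List.filter_cons, if_pos hp]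
      simp
    · have hs : ¬ s = pvPrefix kv.1 := fun hh => hp (by simp [hh])
      rw [if_neg hs, List.filter_cons, if_neg (by simpa using hp)]

-- A's grouping presented as B's
lemma pvRel (l : List (String × Int)) (level : Int) (h : (l.map (fun kv => kv.1)).Nodup) :
    (pvRunG PySem.Dict.empty l).items.map (fun kv => (kv.1, pvRank kv.2.items level)) =
      (pvGB l).items.map (fun si => (si.1, pvRank si.2 level)) := by
  have hnd1 : (pvRunG PySem.Dict.empty l).keys.Nodup :=
    nodup_keys_pvRunG _ _ (by simp [PySem.Dict.keys_empty])
  have hnd2 : (pvGB l).keys.Nodup := by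
    unfold pvGB
    exact PySem.Dict.nodup_keys_foldl_modify_key l (fun kv => pvPrefix kv.1) []
      (fun g kv ls => ls ++ [kv]) PySem.Dict.empty (by simp [PySem.Dict.keys_empty])
  have hK1 : (pvRunG PySem.Dict.empty l).keys = PySem.Set.ofList (l.map (fun kv => pvPrefix kv.1)) := by
    rw [keys_pvRunG, PySem.Dict.keys_empty, PySem.Set.update_nil_left]
  have hK2 : (pvGB l).keys = PySem.Set.ofList (l.map (fun kv => pvPrefix kv.1)) := by
    unfold pvGB
    rw [PySem.Dict.keys_foldl_modify_key l (fun kv => pvPrefix kv.1) []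
      (fun g kv ls => ls ++ [kv]) PySem.Dict.empty, PySem.Dict.keys_empty, PySem.Set.update_nil_left]
  have hitems : ∀ s, ((pvRunG PySem.Dict.empty l).getD s PySem.Dict.empty).items = (pvGB l).getD s [] := by
    intro s
    have hGB : (pvGB l).getD s [] = l.filter (fun kv => pvPrefix kv.1 == s) := by
      unfold pvGB
      rw [getD_pvGBfold, PySem.Dict.getD_empty, List.nil_append]
    rw [hGB, getD_pvRunG, PySem.Dict.getD_empty, items_pvInsKV_empty]
    rw [pvFilter_map_fst l (fun x => pvPrefix x == s)]
    exact h.filter _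
  rw [PySem.Dict.items_eq_map_keys (pvRunG PySem.Dict.empty l) hnd1 PySem.Dict.empty,
    PySem.Dict.items_eq_map_keys (pvGB l) hnd2 [], hK1, hK2, List.map_map, List.map_map]
  exact List.map_congr_left (fun s _ => by simp [hitems s])

-- ===== VERDICT (by name: the statement is the Claim_ definition above) =====
theorem dist_vote_spec : Claim_equal_dist_vote := by
  intro pairs level _ _
  unfold Spec_dist_vote
  rw [pvA_eq, pvB_eq, pvStepScA_eq, pvRunGA_eq]
  have h2 : pairs.foldl (fun sg kv => (pvStepSc sg.1 kv, pvRunG sg.2 (pvStepSc sg.1 kv).items))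
      (PySem.Dict.empty, PySem.Dict.empty) =
      (pvScore pairs, pvRunG PySem.Dict.empty (pvScore pairs).items) := pvMain pairs PySem.Dict.empty
  rw [h2]
  have hndG : (pvRunG PySem.Dict.empty (pvScore pairs).items).keys.Nodup :=
    nodup_keys_pvRunG _ _ (by simp [PySem.Dict.keys_empty])
  have hfresh := PySem.Dict.items_foldl_insert_fresh
    (pvRunG PySem.Dict.empty (pvScore pairs).items).items (fun kv => kv.1)
    (fun kv => pvRank kv.2.items level) PySem.Dict.empty
    (fun a _ => PySem.Dict.contains_empty _) hndG
  rw [hfresh]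
  have hrel := pvRel (pvScore pairs).items level (pvNodup_keys_score pairs)
  simpa using hrel
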